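-- pv_equiv track=rewrite | github.com/kmh03214/Algorithm | python/Backjoon/boj_17140_이차원배열과연산.py | oper
-- ===== SOURCE A (Python) =====
-- def oper(arr):
--     new_arr, cnt_dict = [],{}
--     for num in arr:
--         if num == 0:
--             continue
--         if num not in cnt_dict:
--             cnt_dict[num] = 1
--         else:
--             cnt_dict[num] += 1
--
--     for num,cnt in sorted(cnt_dict.items(), key= lambda x: (x[1],x[0])):
--         new_arr.append(num)
--         new_arr.append(cnt)
--         if len(new_arr) == 100:
--             break
--     return new_arr
-- ===== SOURCE B (Python) =====
-- def oper(arr):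
--     vals = sorted([x for x in arr if x != 0])
--     pairs = []
--     for v in vals:
--         if pairs and pairs[-1][0] == v:
--             pairs[-1] = (v, pairs[-1][1] + 1)
--         else:
--             pairs.append((v, 1))
--     pairs = sorted(pairs, key=lambda p: (p[1], p[0]))
--     flat = []
--     for v, c in pairs:
--         flat.append(v)
--         flat.append(c)
--     return flat[:100]
-- ===== Notes on version B (the rewrite author's own statement) =====
-- stated objective: alternative
-- what changed: Counting is done by sorting the nonzero values and grouping consecutive equal runs in one pass (with a slice cap at 100), instead of hash-accumulating counts into a dict and breaking out of the flattening loop at length 100.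
import Mathlib
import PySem

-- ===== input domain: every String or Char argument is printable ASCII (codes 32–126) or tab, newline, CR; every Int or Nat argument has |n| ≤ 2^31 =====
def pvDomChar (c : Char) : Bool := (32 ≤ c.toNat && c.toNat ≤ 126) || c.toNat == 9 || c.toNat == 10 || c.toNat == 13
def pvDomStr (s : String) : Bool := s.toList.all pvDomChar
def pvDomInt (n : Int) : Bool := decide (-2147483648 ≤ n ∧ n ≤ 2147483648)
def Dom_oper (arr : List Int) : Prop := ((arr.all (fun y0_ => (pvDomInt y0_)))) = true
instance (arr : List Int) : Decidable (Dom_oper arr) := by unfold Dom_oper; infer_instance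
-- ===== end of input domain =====

-- B counts by sorting the nonzero values and grouping consecutive runs instead of hash-accumulating
-- counts into a dict; equivalence of the return values is proved (neither version mutates its argument).

-- ===== PORT A =====
-- the output loop of A: append num and cnt, break when the list reaches length 100
def operFlatA (acc : List Int) : List (Int × Int) → List Int
  | [] => acc
  | (num, cnt) :: rest =>
      let acc' := acc ++ [num, cnt]
      if acc'.length == 100 then acc' else operFlatA acc' rest

def oper (arr : List Int) : List Int :=
  let cnt_dict : PySem.Dict Int Int := arr.foldl (fun d num =>
    if num == 0 then d
    else if d.contains num = false then d.insert num 1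
    else d.insert num (d.getD num 0 + 1)) PySem.Dict.empty
  operFlatA [] (PySem.List.sorted2 cnt_dict.items (fun x => x.2) (fun x => x.1))

-- ===== PORT B =====
def oper_alt (arr : List Int) : List Int :=
  let vals := PySem.List.sorted (arr.filter (fun x => x != 0)) (fun x => x)
  let pairs : List (Int × Int) := vals.foldl (fun pairs v =>
    match pairs.getLast? with
    | some p => if p.1 == v then pairs.dropLast ++ [(v, p.2 + 1)] else pairs ++ [(v, 1)]
    | none => pairs ++ [(v, 1)]) []
  let pairs2 := PySem.List.sorted2 pairs (fun p => p.2) (fun p => p.1)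
  let flat := pairs2.foldl (fun acc p => acc ++ [p.1, p.2]) []
  PySem.List.slice flat none (some 100)

-- ===== PRECONDITION & SPEC =====
def Spec_oper (arr : List Int) (out : List Int) : Prop := out = oper_alt arr
instance (arr : List Int) (out : List Int) : Decidable (Spec_oper arr out) := by unfold Spec_oper; infer_instance

-- ===== CLAIM (what is proved, stated in full; the proofs are below) =====
def Claim_equal_oper : Prop := ∀ (arr : List Int), Dom_oper arr → Spec_oper arr (oper arr)

-- ===== LEMMAS AND PROOFS =====

-- consecutive-run grouping, recursively (proof-side model of B's pair-building loop)
def mergeRun (v c : Int) : List Int → List (Int × Int)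
  | [] => [(v, c)]
  | x :: xs => if x == v then mergeRun v (c + 1) xs else (v, c) :: mergeRun x 1 xs

-- B's pair-building fold computes mergeRun
theorem foldPairs_eq_mergeRun_aux (l : List Int) (gs : List (Int × Int)) (v c : Int) :
    l.foldl (fun pairs v =>
      match pairs.getLast? with
      | some p => if p.1 == v then pairs.dropLast ++ [(v, p.2 + 1)] else pairs ++ [(v, 1)]
      | none => pairs ++ [(v, 1)]) (gs ++ [(v, c)]) = gs ++ mergeRun v c l := by
  induction l generalizing gs v c with
  | nil => simp [mergeRun]
  | cons x rest ih =>
    simp only [List.foldl_cons, List.getLast?_concat, List.dropLast_concat, mergeRun]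
    by_cases h : x = v
    · subst h
      simp only [beq_self_eq_true]
      exact ih gs x (c + 1)
    · have hb : (v == x) = false := by simp [Ne.symm h]
      have hb' : (x == v) = false := by simp [h]
      simp only [hb, hb', Bool.false_eq_true, if_false, List.append_assoc]
      have := ih (gs ++ [(v, c)]) x 1
      simpa [List.append_assoc] using this

theorem foldPairs_eq_mergeRun (v : Int) (rest : List Int) :
    (v :: rest).foldl (fun pairs v =>
      match pairs.getLast? with
      | some p => if p.1 == v then pairs.dropLast ++ [(v, p.2 + 1)] else pairs ++ [(v, 1)]
      | none => pairs ++ [(v, 1)]) ([] : List (Int × Int)) = mergeRun v 1 rest := by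
  have := foldPairs_eq_mergeRun_aux rest ([] : List (Int × Int)) v 1
  simpa using this

-- characterisation of mergeRun on a sorted list
theorem mem_mergeRun (xs : List Int) (v c : Int) (hs : List.Pairwise (· ≤ ·) (v :: xs))
    (p : Int × Int) :
    p ∈ mergeRun v c xs ↔
      (p.1 = v ∧ p.2 = c + (xs.count v : Int)) ∨
      (p.1 ∈ xs ∧ v < p.1 ∧ p.2 = (xs.count p.1 : Int)) := by
  induction xs generalizing v c with
  | nil =>
    simp only [mergeRun, List.mem_singleton, Prod.ext_iff, List.count_nil, List.not_mem_nil,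
      false_and, or_false, Nat.cast_zero, add_zero]
  | cons x t ih =>
    rw [List.pairwise_cons] at hs
    obtain ⟨hvle, hst⟩ := hs
    simp only [mergeRun]
    by_cases hx : x = v
    · subst hx
      have hs' : List.Pairwise (· ≤ ·) (x :: t) := hst
      rw [if_pos (beq_self_eq_true x), ih x (c + 1) hs']
      constructor
      · rintro (⟨h1, h2⟩ | ⟨h1, h2, h3⟩)
        · exact Or.inl ⟨h1, by simp [h2, List.count_cons_self]; ring⟩
        · refine Or.inr ⟨List.mem_cons_of_mem _ h1, h2, ?_⟩
          rw [List.count_cons_of_ne (ne_of_lt h2)]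
          exact h3
      · rintro (⟨h1, h2⟩ | ⟨h1, h2, h3⟩)
        · exact Or.inl ⟨h1, by simp [List.count_cons_self] at h2 ⊢; omega⟩
        · rcases List.mem_cons.mp h1 with h1' | h1'
          · exact absurd (h1' ▸ h2) (lt_irrefl x)
          · refine Or.inr ⟨h1', h2, ?_⟩
            rw [List.count_cons_of_ne (ne_of_lt h2)] at h3
            exact h3
    · have hvx : v < x := lt_of_le_of_ne (hvle x (List.mem_cons_self)) (fun he => hx he.symm)
      have hxall : ∀ u ∈ t, x ≤ u := (List.pairwise_cons.mp hst).1
      have hvnot : (x :: t).count v = 0 := by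
        rw [List.count_eq_zero]
        intro hv
        rcases List.mem_cons.mp hv with h' | h'
        · exact hx h'.symm
        · exact absurd (hxall v h') (not_le.mpr hvx)
      rw [if_neg (by simp [hx]), List.mem_cons]
      rw [ih x 1 hst]
      constructor
      · rintro (h0 | ⟨h1, h2⟩ | ⟨h1, h2, h3⟩)
        · exact Or.inl ⟨by simp [h0], by simp [h0, hvnot]⟩
        · exact Or.inr ⟨List.mem_cons.mpr (Or.inl h1), h1 ▸ hvx, by
            rw [h1, List.count_cons_self]; omega⟩
        · exact Or.inr ⟨List.mem_cons.mpr (Or.inr h1), lt_trans hvx h2, by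
            rw [List.count_cons_of_ne (ne_of_lt h2)]; exact h3⟩
      · rintro (⟨h1, h2⟩ | ⟨h1, h2, h3⟩)
        · exact Or.inl (Prod.ext h1 (by rw [h2, hvnot]; simp))
        · by_cases hpx : p.1 = x
          · refine Or.inr (Or.inl ⟨hpx, ?_⟩)
            rw [hpx, List.count_cons_self] at h3; omega
          · rcases List.mem_cons.mp h1 with h1' | h1'
            · exact absurd h1' hpx
            · refine Or.inr (Or.inr ⟨h1', lt_of_le_of_ne (hxall _ h1') (fun he => hpx he.symm), ?_⟩)
              rw [List.count_cons_of_ne (fun he => hpx he.symm)] at h3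
              exact h3

theorem pairwise_fst_mergeRun (xs : List Int) (v c : Int)
    (hs : List.Pairwise (· ≤ ·) (v :: xs)) :
    List.Pairwise (fun p q : Int × Int => p.1 < q.1) (mergeRun v c xs) := by
  induction xs generalizing v c with
  | nil => simp [mergeRun]
  | cons x t ih =>
    rw [List.pairwise_cons] at hs
    obtain ⟨hvle, hst⟩ := hs
    simp only [mergeRun]
    by_cases hx : x = v
    · subst hx
      rw [if_pos (beq_self_eq_true x)]
      exact ih x (c + 1) hst
    · have hvx : v < x := lt_of_le_of_ne (hvle x (List.mem_cons_self)) (fun he => hx he.symm)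
      rw [if_neg (by simp [hx])]
      refine List.pairwise_cons.mpr ⟨?_, ih x 1 hst⟩
      intro q hq
      rcases (mem_mergeRun t x 1 hst q).mp hq with ⟨h1, _⟩ | ⟨_, h2, _⟩
      · exact h1 ▸ hvx
      · exact lt_trans hvx h2

theorem mem_mergeRun_one (xs : List Int) (v : Int) (hs : List.Pairwise (· ≤ ·) (v :: xs))
    (p : Int × Int) :
    p ∈ mergeRun v 1 xs ↔ p.1 ∈ (v :: xs) ∧ p.2 = ((v :: xs).count p.1 : Int) := by
  rw [mem_mergeRun xs v 1 hs p]
  have hvle := (List.pairwise_cons.mp hs).1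
  constructor
  · rintro (⟨h1, h2⟩ | ⟨h1, h2, h3⟩)
    · exact ⟨List.mem_cons.mpr (Or.inl h1), by rw [h1, List.count_cons_self]; omega⟩
    · exact ⟨List.mem_cons.mpr (Or.inr h1), by
        rw [List.count_cons_of_ne (ne_of_lt h2)]; exact h3⟩
  · rintro ⟨h1, h2⟩
    by_cases hp : p.1 = v
    · refine Or.inl ⟨hp, ?_⟩
      rw [hp, List.count_cons_self] at h2; omega
    · rcases List.mem_cons.mp h1 with h' | h'
      · exact absurd h' hp
      · refine Or.inr ⟨h', lt_of_le_of_ne (hvle _ h') (fun he => hp he.symm), ?_⟩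
        rw [List.count_cons_of_ne (fun he => hp he.symm)] at h2
        exact h2

-- A's counting fold is the Counter of the nonzero elements
theorem foldCount_eq_counter (l : List Int) :
    l.foldl (fun d num =>
      if num == 0 then d
      else if d.contains num = false then d.insert num 1
      else d.insert num (d.getD num 0 + 1)) PySem.Dict.empty
    = PySem.Dict.counter (l.filter (fun x => x != 0)) := by
  rw [← PySem.Dict.foldl_insert_getD_add_one_eq_counter]
  generalize PySem.Dict.empty = d
  induction l generalizing d with
  | nil => rfl
  | cons x t ih =>
    simp only [List.foldl_cons, List.filter_cons]
    by_cases hx : x = (0 : Int)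
    · simp only [hx, beq_self_eq_true, if_pos, bne_self_eq_false, Bool.false_eq_true, if_false]
      exact ih d
    · have hb : (x == (0 : Int)) = false := beq_eq_false_iff_ne.mpr hx
      have hbne : (x != (0 : Int)) = true := by simp [bne, hb]
      rw [hbne]
      simp only [hb, Bool.false_eq_true, if_false, if_true, List.foldl_cons]
      have hstep : (if d.contains x = false then d.insert x 1
          else d.insert x (d.getD x 0 + 1)) = d.insert x (d.getD x 0 + 1) := by
        by_cases hc : d.contains x
        · rw [if_neg (by simp [hc])]
        · have hcf : d.contains x = false := by simpa using hc
          rw [if_pos hcf, PySem.Dict.getD_of_not_contains d 0 hcf]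
          norm_num
      rw [hstep]
      exact ih _

-- sorted2 with keys (snd, fst) is sorted with the lexicographic key
theorem sorted2_eq_sorted_lex (xs : List (Int × Int)) :
    PySem.List.sorted2 xs (fun p => p.2) (fun p => p.1)
      = PySem.List.sorted xs (fun p => toLex (p.2, p.1)) := by
  simp only [PySem.List.sorted2, PySem.List.sorted]
  congr 1
  funext acc x
  congr 1
  funext a b
  by_cases h1 : a.2 < b.2 <;> by_cases h2 : b.2 < a.2 <;> by_cases h3 : a.1 < b.1 <;>
    simp [Prod.Lex.lt_iff, h1, h2, h3] <;> omega

theorem lexkey_injective : Function.Injective (fun p : Int × Int => toLex (p.2, p.1)) := by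
  intro a b h
  have h' : ((a.2, a.1) : Int × Int) = (b.2, b.1) := congrArg ofLex h
  have h1 := congrArg Prod.fst h'
  have h2 := congrArg Prod.snd h'
  exact Prod.ext h2 h1

-- the two pair lists are permutations of each other
theorem pairs_perm (xs : List Int) :
    ((PySem.Dict.counter xs).items).Perm
      ((PySem.List.sorted xs (fun x => x)).foldl (fun pairs v =>
        match pairs.getLast? with
        | some p => if p.1 == v then pairs.dropLast ++ [(v, p.2 + 1)] else pairs ++ [(v, 1)]
        | none => pairs ++ [(v, 1)]) ([] : List (Int × Int))) := by
  rcases h : PySem.List.sorted xs (fun x => x) with _ | ⟨v, rest⟩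
  · have hxs : xs = [] := (PySem.List.sorted_eq_nil_iff xs (fun x => x) false).mp h
    subst hxs
    simp [PySem.Dict.items_counter, PySem.Set.ofList_nil]
  · rw [foldPairs_eq_mergeRun v rest]
    have hs : List.Pairwise (· ≤ ·) (v :: rest) := by
      have := PySem.List.sorted_pairwise xs (fun x => x)
      rw [h] at this
      exact this
    have nd1 : ((PySem.Dict.counter xs).items).Nodup := by
      rw [PySem.Dict.items_counter]
      exact List.Nodup.map (fun a b hab => congrArg Prod.fst hab) (PySem.Set.nodup_ofList xs)
    have nd2 : (mergeRun v 1 rest).Nodup :=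
      (pairwise_fst_mergeRun rest v 1 hs).imp (fun hlt heq => by rw [heq] at hlt; exact lt_irrefl _ hlt)
    refine (List.perm_ext_iff_of_nodup nd1 nd2).mpr ?_
    intro a
    rw [PySem.Dict.items_counter, mem_mergeRun_one rest v hs a]
    have hcnt : (v :: rest).count a.1 = xs.count a.1 := by
      rw [← h]; exact (PySem.List.sorted_perm xs (fun x => x) false).count_eq a.1
    have hmem : a.1 ∈ (v :: rest) ↔ a.1 ∈ xs := by
      rw [← h]; exact PySem.List.mem_sorted xs (fun x => x) false a.1
    rw [hcnt, hmem]
    simp only [List.mem_map, PySem.Set.mem_ofList]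
    constructor
    · rintro ⟨k, hk, hka⟩
      exact ⟨by rw [← hka]; exact hk, by rw [← hka]⟩
    · rintro ⟨h1, h2⟩
      exact ⟨a.1, h1, Prod.ext rfl h2.symm⟩

-- flattening
theorem foldl_flat (l : List (Int × Int)) (acc : List Int) :
    l.foldl (fun acc p => acc ++ [p.1, p.2]) acc = acc ++ l.flatMap (fun p => [p.1, p.2]) := by
  induction l generalizing acc with
  | nil => simp
  | cons p rest ih => simp [ih, List.append_assoc]

theorem operFlatA_eq_take (l : List (Int × Int)) (acc : List Int)
    (he : acc.length % 2 = 0) (hl : acc.length < 100) :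
    operFlatA acc l = acc ++ (l.flatMap (fun p => [p.1, p.2])).take (100 - acc.length) := by
  induction l generalizing acc with
  | nil => simp [operFlatA]
  | cons p rest ih =>
    obtain ⟨num, cnt⟩ := p
    simp only [operFlatA, List.length_append]
    by_cases h : acc.length + [num, cnt].length = 100
    · have h2 : acc.length + 2 = 100 := by simpa using h
      rw [if_pos (by simpa using beq_iff_eq.mpr h)]
      have htk : 100 - acc.length = 2 := by omega
      simp only [List.flatMap_cons, htk]
      rw [List.take_append_of_le_length (by simp)]
      simp
    · have h2 : acc.length + 2 ≠ 100 := by simpa using h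
      rw [if_neg (by simp; omega)]
      have hrec := ih (acc ++ [num, cnt]) (by simp [he]) (by simp; omega)
      rw [hrec]
      have hsplit : 100 - acc.length = 2 + (100 - (acc.length + 2)) := by omega
      simp only [List.flatMap_cons, List.append_assoc, List.length_append]
      rw [hsplit, List.take_append]
      rw [List.take_of_length_le (l := [num, cnt]) (by simp)]
      simp

-- ===== VERDICT (by name: the statement is the Claim_ definition above) =====
theorem oper_spec : Claim_equal_oper := by
  intro arr _
  show oper arr = oper_alt arr
  rw [oper, oper_alt]
  rw [foldCount_eq_counter arr, sorted2_eq_sorted_lex, sorted2_eq_sorted_lex]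
  rw [PySem.List.sorted_eq_sorted_of_perm _ _ _ lexkey_injective
        (pairs_perm (arr.filter (fun x => x != 0)))]
  rw [operFlatA_eq_take _ [] (by simp) (by simp)]
  rw [foldl_flat, PySem.List.slice_to _ (by norm_num)]
  simp
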